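-- pv_equiv track=rewrite | github.com/heltonmaia/proj-question-generator | question_generator/questions/question_ch5_0049.py | analisar_lista_numeros
-- ===== SOURCE A (Python) =====
-- from typing import List, Tuple
--
-- def analisar_lista_numeros(lista_de_numeros: List[int]) -> Tuple[int, int, int, int, int]:
--     """
--     Analisa uma lista de números inteiros, contando pares, ímpares,
--     positivos, negativos e zeros.
--
--     Args:
--         lista_de_numeros: Uma lista de números inteiros.
--
--     Returns:
--         Uma tupla contendo:
--         - A contagem de números pares.
--         - A contagem de números ímpares.
--         - A contagem de números positivos.
--         - A contagem de números negativos.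
--         - A contagem de zeros.
--     """
--     pares = 0
--     impares = 0
--     positivos = 0
--     negativos = 0
--     zeros = 0
--
--     for numero in lista_de_numeros:
--         # Contagem de pares/ímpares
--         if numero % 2 == 0:
--             pares += 1
--         else:
--             impares += 1
--
--         # Contagem de positivos/negativos/zeros
--         if numero > 0:
--             positivos += 1
--         elif numero < 0:
--             negativos += 1
--         else:  # numero == 0
--             zeros += 1
--
--     return pares, impares, positivos, negativos, zeros
-- ===== SOURCE B (Python) =====
-- from typing import List, Tuple
--
-- def analisar_lista_numeros(lista_de_numeros: List[int]) -> Tuple[int, int, int, int, int]: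
--     pares = sum(1 for n in lista_de_numeros if n % 2 == 0)
--     impares = sum(1 for n in lista_de_numeros if n % 2 != 0)
--     positivos = sum(1 for n in lista_de_numeros if n > 0)
--     negativos = sum(1 for n in lista_de_numeros if n < 0)
--     zeros = sum(1 for n in lista_de_numeros if n == 0)
--     return pares, impares, positivos, negativos, zeros
-- ===== Notes on version B (the rewrite author's own statement) =====
-- stated objective: idiomatic
-- what changed: Replaces the single branching accumulator loop with five independent filter-count passes (one sum-comprehension per count).
import Mathlib
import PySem

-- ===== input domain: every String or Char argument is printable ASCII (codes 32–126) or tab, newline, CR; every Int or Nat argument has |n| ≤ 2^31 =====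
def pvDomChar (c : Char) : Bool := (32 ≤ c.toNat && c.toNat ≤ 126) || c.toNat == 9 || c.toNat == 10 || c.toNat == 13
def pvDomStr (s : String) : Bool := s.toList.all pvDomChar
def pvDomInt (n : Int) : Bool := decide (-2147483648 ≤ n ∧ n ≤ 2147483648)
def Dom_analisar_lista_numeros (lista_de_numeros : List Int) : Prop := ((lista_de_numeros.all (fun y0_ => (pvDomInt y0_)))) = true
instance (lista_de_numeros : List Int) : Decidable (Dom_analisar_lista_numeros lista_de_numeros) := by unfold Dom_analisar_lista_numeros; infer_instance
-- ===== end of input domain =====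

-- B computes the five counts with five independent filter-count passes instead of A's single branching accumulator loop (objective: idiomatic).
-- ===== PORT A =====
-- loop body of A, kept as a named helper (one iteration of the for-loop)
def pvStepA (acc : Int × Int × Int × Int × Int) (numero : Int) : Int × Int × Int × Int × Int :=
  let (pares, impares, positivos, negativos, zeros) := acc
  let (pares, impares) :=
    if PySem.Int.mod numero 2 = 0 then (pares + 1, impares) else (pares, impares + 1)
  let (positivos, negativos, zeros) :=
    if numero > 0 then (positivos + 1, negativos, zeros)
    else if numero < 0 then (positivos, negativos + 1, zeros)
    else (positivos, negativos, zeros + 1)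
  (pares, impares, positivos, negativos, zeros)

def analisar_lista_numeros (lista_de_numeros : List Int) : Int × Int × Int × Int × Int :=
  lista_de_numeros.foldl pvStepA (0, 0, 0, 0, 0)

-- ===== PORT B =====
def analisar_lista_numeros_alt (lista_de_numeros : List Int) : Int × Int × Int × Int × Int :=
  let pares : Int := (lista_de_numeros.countP (fun n => PySem.Int.mod n 2 == 0) : Nat)
  let impares : Int := (lista_de_numeros.countP (fun n => PySem.Int.mod n 2 != 0) : Nat)
  let positivos : Int := (lista_de_numeros.countP (fun n => n > 0) : Nat)
  let negativos : Int := (lista_de_numeros.countP (fun n => n < 0) : Nat)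
  let zeros : Int := (lista_de_numeros.countP (fun n => n == 0) : Nat)
  (pares, impares, positivos, negativos, zeros)

-- ===== PRECONDITION & SPEC =====
def Spec_analisar_lista_numeros (lista_de_numeros : List Int) (out : Int × Int × Int × Int × Int) : Prop := out = analisar_lista_numeros_alt lista_de_numeros
instance (lista_de_numeros : List Int) (out : Int × Int × Int × Int × Int) : Decidable (Spec_analisar_lista_numeros lista_de_numeros out) := by unfold Spec_analisar_lista_numeros; infer_instance

-- ===== CLAIM (what is proved, stated in full; the proofs are below) =====
def Claim_equal_analisar_lista_numeros : Prop := ∀ (lista_de_numeros : List Int), Dom_analisar_lista_numeros lista_de_numeros → Spec_analisar_lista_numeros lista_de_numeros (analisar_lista_numeros lista_de_numeros)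

-- ===== LEMMAS AND PROOFS =====
lemma pv_foldl_counts (xs : List Int) (p i po ne z : Int) :
    xs.foldl pvStepA (p, i, po, ne, z)
    = (p + (xs.countP (fun n => PySem.Int.mod n 2 == 0) : Nat),
       i + (xs.countP (fun n => PySem.Int.mod n 2 != 0) : Nat),
       po + (xs.countP (fun n => n > 0) : Nat),
       ne + (xs.countP (fun n => n < 0) : Nat),
       z + (xs.countP (fun n => n == 0) : Nat)) := by
  induction xs generalizing p i po ne z with
  | nil => simp
  | cons x xs ih =>
    by_cases h2 : x % 2 = 0 <;> rcases lt_trichotomy x 0 with h | h | h <;>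
      simp [pvStepA, PySem.Int.mod_eq_emod_of_pos (by norm_num : (0:Int) < 2), h2, h, not_lt.mpr h.le, ih] <;>
      (try simp [List.countP_cons, beq_iff_eq]) <;> omega

-- ===== VERDICT (by name: the statement is the Claim_ definition above) =====
theorem analisar_lista_numeros_spec : Claim_equal_analisar_lista_numeros := by
  intro xs _
  unfold Spec_analisar_lista_numeros analisar_lista_numeros analisar_lista_numeros_alt
  rw [pv_foldl_counts]
  simp
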